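-- pv_equiv track=rewrite | github.com/LynxTWO/mix-marriage-offline | src/mmo/core/deliverables.py | _warning_codes_from_strings
-- ===== SOURCE A (Python) =====
-- from typing import Any, Dict, List, Sequence, Tuple
--
-- RENDER_RESULT_DOWNMIX_QA_FAILED = "RENDER_RESULT.DOWNMIX_QA_FAILED"
--
-- RENDER_RESULT_FALLBACK_APPLIED = "RENDER_RESULT.FALLBACK_APPLIED"
--
-- RENDER_RESULT_MISSING_CHANNEL_ORDER = "RENDER_RESULT.MISSING_CHANNEL_ORDER"
--
-- RENDER_RESULT_NO_DECODABLE_STEMS = "RENDER_RESULT.NO_DECODABLE_STEMS"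
--
-- RENDER_RESULT_PLACEMENT_POLICY_UNAVAILABLE = "RENDER_RESULT.PLACEMENT_POLICY_UNAVAILABLE"
--
-- RENDER_RESULT_SAFETY_COLLAPSE_APPLIED = "RENDER_RESULT.SAFETY_COLLAPSE_APPLIED"
--
-- RENDER_RESULT_SILENT_OUTPUT = "RENDER_RESULT.SILENT_OUTPUT"
--
-- RENDER_RESULT_STEM_DECODE_FAILED = "RENDER_RESULT.STEM_DECODE_FAILED"
--
-- def _warning_codes_from_strings(values: Sequence[str]) -> list[str]:
--     codes: set[str] = set()
--     for raw_value in values: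
--         value = raw_value.strip()
--         if not value:
--             continue
--         if "downmix_similarity_gate_failed_after_fallback" in value:
--             codes.add(RENDER_RESULT_DOWNMIX_QA_FAILED)
--         if value.endswith(":fallback_applied") or value == "fallback_applied":
--             codes.add(RENDER_RESULT_FALLBACK_APPLIED)
--         if value.endswith(":missing_channel_order") or value == "missing_channel_order":
--             codes.add(RENDER_RESULT_MISSING_CHANNEL_ORDER)
--         if (
--             "rendered_silence:no_decodable_stems" in value
--             or value == "rendered_silence:no_decodable_stems"
--         ):
--             codes.add(RENDER_RESULT_NO_DECODABLE_STEMS)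
--         if value.endswith(":placement_policy_unavailable") or value == "placement_policy_unavailable":
--             codes.add(RENDER_RESULT_PLACEMENT_POLICY_UNAVAILABLE)
--         if value.endswith(":safety_collapse_applied") or value == "safety_collapse_applied":
--             codes.add(RENDER_RESULT_SAFETY_COLLAPSE_APPLIED)
--         if value.endswith(":silent_output") or value == "silent_output":
--             codes.add(RENDER_RESULT_SILENT_OUTPUT)
--         if value.endswith(":decode_failed") or "decode_failed" in value:
--             codes.add(RENDER_RESULT_STEM_DECODE_FAILED)
--     return sorted(codes)
-- ===== SOURCE B (Python) =====
-- RENDER_RESULT_DOWNMIX_QA_FAILED = "RENDER_RESULT.DOWNMIX_QA_FAILED"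
-- RENDER_RESULT_FALLBACK_APPLIED = "RENDER_RESULT.FALLBACK_APPLIED"
-- RENDER_RESULT_MISSING_CHANNEL_ORDER = "RENDER_RESULT.MISSING_CHANNEL_ORDER"
-- RENDER_RESULT_NO_DECODABLE_STEMS = "RENDER_RESULT.NO_DECODABLE_STEMS"
-- RENDER_RESULT_PLACEMENT_POLICY_UNAVAILABLE = "RENDER_RESULT.PLACEMENT_POLICY_UNAVAILABLE"
-- RENDER_RESULT_SAFETY_COLLAPSE_APPLIED = "RENDER_RESULT.SAFETY_COLLAPSE_APPLIED"
-- RENDER_RESULT_SILENT_OUTPUT = "RENDER_RESULT.SILENT_OUTPUT"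
-- RENDER_RESULT_STEM_DECODE_FAILED = "RENDER_RESULT.STEM_DECODE_FAILED"
--
-- # Classification table, ordered by code name so the result comes out sorted
-- # without building a set: ("sub", token) matches when token is a substring of
-- # the stripped value; ("suf", token) matches when the stripped value ends with
-- # ":"+token or equals token.
-- _RULES = [
--     ("sub", "downmix_similarity_gate_failed_after_fallback", RENDER_RESULT_DOWNMIX_QA_FAILED),
--     ("suf", "fallback_applied", RENDER_RESULT_FALLBACK_APPLIED),
--     ("suf", "missing_channel_order", RENDER_RESULT_MISSING_CHANNEL_ORDER),
--     ("sub", "rendered_silence:no_decodable_stems", RENDER_RESULT_NO_DECODABLE_STEMS),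
--     ("suf", "placement_policy_unavailable", RENDER_RESULT_PLACEMENT_POLICY_UNAVAILABLE),
--     ("suf", "safety_collapse_applied", RENDER_RESULT_SAFETY_COLLAPSE_APPLIED),
--     ("suf", "silent_output", RENDER_RESULT_SILENT_OUTPUT),
--     ("sub", "decode_failed", RENDER_RESULT_STEM_DECODE_FAILED),
-- ]
--
--
-- def _warning_codes_from_strings(values):
--     stripped = [raw.strip() for raw in values]
--     out = []
--     for kind, token, code in _RULES:
--         if kind == "sub":
--             hit = any(token in v for v in stripped)
--         else:
--             hit = any(v == token or v.endswith(":" + token) for v in stripped)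
--         if hit:
--             out.append(code)
--     return out
-- ===== Notes on version B (the rewrite author's own statement) =====
-- stated objective: simpler
-- what changed: Replaces the value-major chain of eight hard-coded if/add branches plus a final set-sort by a rule-major pass over a classification table ordered by code name, so the result list is emitted directly in sorted order with no set and no sort.
import Mathlib
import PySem

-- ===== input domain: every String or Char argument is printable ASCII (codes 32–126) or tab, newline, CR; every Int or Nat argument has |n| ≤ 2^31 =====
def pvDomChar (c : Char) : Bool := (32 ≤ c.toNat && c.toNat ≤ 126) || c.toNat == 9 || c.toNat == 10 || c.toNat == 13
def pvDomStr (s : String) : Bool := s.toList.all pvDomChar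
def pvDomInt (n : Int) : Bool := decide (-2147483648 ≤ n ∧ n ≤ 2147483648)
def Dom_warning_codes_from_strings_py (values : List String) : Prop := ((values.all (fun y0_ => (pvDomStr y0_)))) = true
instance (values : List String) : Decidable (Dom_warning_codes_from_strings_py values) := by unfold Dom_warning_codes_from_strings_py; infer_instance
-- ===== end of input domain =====

-- B replaces A's value-major if/add chain plus final set-sort by one rule-major pass over a
-- code-ordered classification table, emitting the codes directly in sorted order (objective: simpler).

-- ===== PORT A =====
-- loop body of A's 'for raw_value in values' (the eight sequential if/add statements)
def aStep (codes : PySem.Set String) (raw_value : String) : PySem.Set String :=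
  let value := PySem.Str.strip raw_value
  if value == "" then codes
  else
    let codes := if PySem.Str.isIn "downmix_similarity_gate_failed_after_fallback" value then PySem.Set.add codes "RENDER_RESULT.DOWNMIX_QA_FAILED" else codes
    let codes := if PySem.Str.endswith value ":fallback_applied" || value == "fallback_applied" then PySem.Set.add codes "RENDER_RESULT.FALLBACK_APPLIED" else codes
    let codes := if PySem.Str.endswith value ":missing_channel_order" || value == "missing_channel_order" then PySem.Set.add codes "RENDER_RESULT.MISSING_CHANNEL_ORDER" else codes
    let codes := if PySem.Str.isIn "rendered_silence:no_decodable_stems" value || value == "rendered_silence:no_decodable_stems" then PySem.Set.add codes "RENDER_RESULT.NO_DECODABLE_STEMS" else codes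
    let codes := if PySem.Str.endswith value ":placement_policy_unavailable" || value == "placement_policy_unavailable" then PySem.Set.add codes "RENDER_RESULT.PLACEMENT_POLICY_UNAVAILABLE" else codes
    let codes := if PySem.Str.endswith value ":safety_collapse_applied" || value == "safety_collapse_applied" then PySem.Set.add codes "RENDER_RESULT.SAFETY_COLLAPSE_APPLIED" else codes
    let codes := if PySem.Str.endswith value ":silent_output" || value == "silent_output" then PySem.Set.add codes "RENDER_RESULT.SILENT_OUTPUT" else codes
    let codes := if PySem.Str.endswith value ":decode_failed" || PySem.Str.isIn "decode_failed" value then PySem.Set.add codes "RENDER_RESULT.STEM_DECODE_FAILED" else codes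
    codes

def warning_codes_from_strings_py (values : List String) : List String :=
  let codes : PySem.Set String := values.foldl aStep PySem.Set.empty
  PySem.List.sorted codes (fun x => x) false

-- ===== PORT B =====
-- Source B's _RULES table: (kind, token, code), ordered by code name
def bRules : List (String × String × String) :=
  [ ("sub", "downmix_similarity_gate_failed_after_fallback", "RENDER_RESULT.DOWNMIX_QA_FAILED"),
    ("suf", "fallback_applied", "RENDER_RESULT.FALLBACK_APPLIED"),
    ("suf", "missing_channel_order", "RENDER_RESULT.MISSING_CHANNEL_ORDER"),
    ("sub", "rendered_silence:no_decodable_stems", "RENDER_RESULT.NO_DECODABLE_STEMS"),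
    ("suf", "placement_policy_unavailable", "RENDER_RESULT.PLACEMENT_POLICY_UNAVAILABLE"),
    ("suf", "safety_collapse_applied", "RENDER_RESULT.SAFETY_COLLAPSE_APPLIED"),
    ("suf", "silent_output", "RENDER_RESULT.SILENT_OUTPUT"),
    ("sub", "decode_failed", "RENDER_RESULT.STEM_DECODE_FAILED") ]

def warning_codes_from_strings_py_alt (values : List String) : List String :=
  let stripped := values.map PySem.Str.strip
  bRules.foldl (fun out rule =>
    if (if rule.1 == "sub" then stripped.any (fun v => PySem.Str.isIn rule.2.1 v)
        else stripped.any (fun v => v == rule.2.1 || PySem.Str.endswith v (":" ++ rule.2.1)))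
    then out ++ [rule.2.2] else out) []

-- ===== PRECONDITION & SPEC =====
def Spec_warning_codes_from_strings_py (values : List String) (out : List String) : Prop := out = warning_codes_from_strings_py_alt values
instance (values : List String) (out : List String) : Decidable (Spec_warning_codes_from_strings_py values out) := by unfold Spec_warning_codes_from_strings_py; infer_instance

-- ===== CLAIM (what is proved, stated in full; the proofs are below) =====
def Claim_equal_warning_codes_from_strings_py : Prop := ∀ (values : List String), Dom_warning_codes_from_strings_py values → Spec_warning_codes_from_strings_py values (warning_codes_from_strings_py values)

-- ===== LEMMAS AND PROOFS =====

-- conditional add, the shape of each of A's eight if/add statements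
def cAdd (b : Bool) (x : String) (s : PySem.Set String) : PySem.Set String :=
  if b then PySem.Set.add s x else s

theorem mem_cAdd (s : List String) (b : Bool) (x c : String) :
    (c ∈ cAdd b x s) ↔ c ∈ s ∨ (b = true ∧ c = x) := by
  unfold cAdd; cases b <;> simp [PySem.Set.mem_add, Or.comm]

theorem nodup_cAdd (s : List String) (b : Bool) (x : String) (h : s.Nodup) :
    (cAdd b x s).Nodup := by
  unfold cAdd; cases b <;> simp [h, PySem.Set.nodup_add]

-- A's per-value match, as one boolean over the input value
def matchA (raw c : String) : Bool :=
  !(PySem.Str.strip raw == "") &&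
    ((c == "RENDER_RESULT.DOWNMIX_QA_FAILED" && PySem.Str.isIn "downmix_similarity_gate_failed_after_fallback" (PySem.Str.strip raw)) ||
     (c == "RENDER_RESULT.FALLBACK_APPLIED" && (PySem.Str.endswith (PySem.Str.strip raw) ":fallback_applied" || PySem.Str.strip raw == "fallback_applied")) ||
     (c == "RENDER_RESULT.MISSING_CHANNEL_ORDER" && (PySem.Str.endswith (PySem.Str.strip raw) ":missing_channel_order" || PySem.Str.strip raw == "missing_channel_order")) ||
     (c == "RENDER_RESULT.NO_DECODABLE_STEMS" && (PySem.Str.isIn "rendered_silence:no_decodable_stems" (PySem.Str.strip raw) || PySem.Str.strip raw == "rendered_silence:no_decodable_stems")) ||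
     (c == "RENDER_RESULT.PLACEMENT_POLICY_UNAVAILABLE" && (PySem.Str.endswith (PySem.Str.strip raw) ":placement_policy_unavailable" || PySem.Str.strip raw == "placement_policy_unavailable")) ||
     (c == "RENDER_RESULT.SAFETY_COLLAPSE_APPLIED" && (PySem.Str.endswith (PySem.Str.strip raw) ":safety_collapse_applied" || PySem.Str.strip raw == "safety_collapse_applied")) ||
     (c == "RENDER_RESULT.SILENT_OUTPUT" && (PySem.Str.endswith (PySem.Str.strip raw) ":silent_output" || PySem.Str.strip raw == "silent_output")) ||
     (c == "RENDER_RESULT.STEM_DECODE_FAILED" && (PySem.Str.endswith (PySem.Str.strip raw) ":decode_failed" || PySem.Str.isIn "decode_failed" (PySem.Str.strip raw))))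

-- A's loop body, zeta-reduced to a chain of conditional adds
theorem aStep_eq (s : PySem.Set String) (v : String) :
    aStep s v =
      if PySem.Str.strip v == "" then s else
        cAdd (PySem.Str.endswith (PySem.Str.strip v) ":decode_failed" || PySem.Str.isIn "decode_failed" (PySem.Str.strip v)) "RENDER_RESULT.STEM_DECODE_FAILED"
        (cAdd (PySem.Str.endswith (PySem.Str.strip v) ":silent_output" || PySem.Str.strip v == "silent_output") "RENDER_RESULT.SILENT_OUTPUT"
        (cAdd (PySem.Str.endswith (PySem.Str.strip v) ":safety_collapse_applied" || PySem.Str.strip v == "safety_collapse_applied") "RENDER_RESULT.SAFETY_COLLAPSE_APPLIED"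
        (cAdd (PySem.Str.endswith (PySem.Str.strip v) ":placement_policy_unavailable" || PySem.Str.strip v == "placement_policy_unavailable") "RENDER_RESULT.PLACEMENT_POLICY_UNAVAILABLE"
        (cAdd (PySem.Str.isIn "rendered_silence:no_decodable_stems" (PySem.Str.strip v) || PySem.Str.strip v == "rendered_silence:no_decodable_stems") "RENDER_RESULT.NO_DECODABLE_STEMS"
        (cAdd (PySem.Str.endswith (PySem.Str.strip v) ":missing_channel_order" || PySem.Str.strip v == "missing_channel_order") "RENDER_RESULT.MISSING_CHANNEL_ORDER"
        (cAdd (PySem.Str.endswith (PySem.Str.strip v) ":fallback_applied" || PySem.Str.strip v == "fallback_applied") "RENDER_RESULT.FALLBACK_APPLIED"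
        (cAdd (PySem.Str.isIn "downmix_similarity_gate_failed_after_fallback" (PySem.Str.strip v)) "RENDER_RESULT.DOWNMIX_QA_FAILED" s))))))) := rfl

theorem mem_aStep (s : PySem.Set String) (v c : String) :
    c ∈ aStep s v ↔ c ∈ s ∨ matchA v c = true := by
  rw [aStep_eq]
  unfold matchA
  by_cases h : (PySem.Str.strip v == "") = true
  · simp [h]
  · simp [h, mem_cAdd, or_assoc, and_comm]

theorem nodup_aStep (s : PySem.Set String) (v : String) (h : s.Nodup) : (aStep s v).Nodup := by
  rw [aStep_eq]
  split
  · exact h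
  · exact nodup_cAdd _ _ _ (nodup_cAdd _ _ _ (nodup_cAdd _ _ _ (nodup_cAdd _ _ _
      (nodup_cAdd _ _ _ (nodup_cAdd _ _ _ (nodup_cAdd _ _ _ (nodup_cAdd _ _ _ h)))))))

theorem mem_foldA (values : List String) (s : PySem.Set String) (c : String) :
    c ∈ values.foldl aStep s ↔ c ∈ s ∨ ∃ v ∈ values, matchA v c = true := by
  induction values generalizing s with
  | nil => simp
  | cons a t ih =>
    simp only [List.foldl_cons, ih, mem_aStep, List.mem_cons]
    constructor
    · rintro ((h | h) | ⟨v, hv, hm⟩)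
      · exact Or.inl h
      · exact Or.inr ⟨a, Or.inl rfl, h⟩
      · exact Or.inr ⟨v, Or.inr hv, hm⟩
    · rintro (h | ⟨v, (rfl | hv), hm⟩)
      · exact Or.inl (Or.inl h)
      · exact Or.inl (Or.inr hm)
      · exact Or.inr ⟨v, hv, hm⟩

theorem nodup_foldA (values : List String) (s : PySem.Set String) (h : s.Nodup) :
    (values.foldl aStep s).Nodup := by
  induction values generalizing s with
  | nil => exact h
  | cons a t ih => exact ih _ (nodup_aStep _ _ h)

-- the eight codes, in the table's order
def codesList : List String := bRules.map (fun r => r.2.2)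

-- 'some input value matches code c under A's tests'
def predP (values : List String) (c : String) : Bool := values.any (fun v => matchA v c)

-- per-code reductions of matchA to B's per-rule tests
theorem matchA_r1 (v : String) : matchA v "RENDER_RESULT.DOWNMIX_QA_FAILED"
    = PySem.Str.isIn "downmix_similarity_gate_failed_after_fallback" (PySem.Str.strip v) := by
  unfold matchA
  by_cases h : PySem.Str.strip v = ""
  · rw [h]; decide
  · simp [h]

theorem matchA_suf (v C tok tokc : String)
    (hC : matchA v C = (!(PySem.Str.strip v == "") &&
        (PySem.Str.endswith (PySem.Str.strip v) tokc || PySem.Str.strip v == tok)))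
    (hc : (":" ++ tok : String) = tokc) (htok : ¬ tok = "")
    (hmt : PySem.Chars.endswith [] tokc.toList = false) :
    matchA v C = (PySem.Str.strip v == tok || PySem.Str.endswith (PySem.Str.strip v) (":" ++ tok)) := by
  rw [hC, hc]
  by_cases h : PySem.Str.strip v = ""
  · simp [h]
    exact ⟨htok, hmt⟩
  · simp [h, Bool.or_comm]

theorem matchA_r2 (v : String) : matchA v "RENDER_RESULT.FALLBACK_APPLIED"
    = (PySem.Str.strip v == "fallback_applied" || PySem.Str.endswith (PySem.Str.strip v) (":" ++ "fallback_applied")) := by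
  apply matchA_suf v _ _ ":fallback_applied" ?_ rfl (by decide) (by decide)
  unfold matchA; simp

theorem matchA_r3 (v : String) : matchA v "RENDER_RESULT.MISSING_CHANNEL_ORDER"
    = (PySem.Str.strip v == "missing_channel_order" || PySem.Str.endswith (PySem.Str.strip v) (":" ++ "missing_channel_order")) := by
  apply matchA_suf v _ _ ":missing_channel_order" ?_ rfl (by decide) (by decide)
  unfold matchA; simp

theorem matchA_r4 (v : String) : matchA v "RENDER_RESULT.NO_DECODABLE_STEMS"
    = PySem.Str.isIn "rendered_silence:no_decodable_stems" (PySem.Str.strip v) := by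
  by_cases he : PySem.Str.strip v = "rendered_silence:no_decodable_stems"
  · unfold matchA; rw [he]; decide
  · unfold matchA
    by_cases h : PySem.Str.strip v = ""
    · rw [h]; decide
    · have hg : (PySem.Str.strip v == "") = false := by simpa using h
      have hge : (PySem.Str.strip v == "rendered_silence:no_decodable_stems") = false := by
        simpa using he
      simp [hg, hge]

theorem matchA_r5 (v : String) : matchA v "RENDER_RESULT.PLACEMENT_POLICY_UNAVAILABLE"
    = (PySem.Str.strip v == "placement_policy_unavailable" || PySem.Str.endswith (PySem.Str.strip v) (":" ++ "placement_policy_unavailable")) := by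
  apply matchA_suf v _ _ ":placement_policy_unavailable" ?_ rfl (by decide) (by decide)
  unfold matchA; simp

theorem matchA_r6 (v : String) : matchA v "RENDER_RESULT.SAFETY_COLLAPSE_APPLIED"
    = (PySem.Str.strip v == "safety_collapse_applied" || PySem.Str.endswith (PySem.Str.strip v) (":" ++ "safety_collapse_applied")) := by
  apply matchA_suf v _ _ ":safety_collapse_applied" ?_ rfl (by decide) (by decide)
  unfold matchA; simp

theorem matchA_r7 (v : String) : matchA v "RENDER_RESULT.SILENT_OUTPUT"
    = (PySem.Str.strip v == "silent_output" || PySem.Str.endswith (PySem.Str.strip v) (":" ++ "silent_output")) := by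
  apply matchA_suf v _ _ ":silent_output" ?_ rfl (by decide) (by decide)
  unfold matchA; simp

theorem matchA_r8 (v : String) : matchA v "RENDER_RESULT.STEM_DECODE_FAILED"
    = PySem.Str.isIn "decode_failed" (PySem.Str.strip v) := by
  unfold matchA
  by_cases h : PySem.Str.strip v = ""
  · rw [h]; decide
  · have key : ∀ w : List Char,
        (PySem.Chars.endswith w [':', 'd', 'e', 'c', 'o', 'd', 'e', '_', 'f', 'a', 'i', 'l', 'e', 'd'] ||
            PySem.Chars.isIn ['d', 'e', 'c', 'o', 'd', 'e', '_', 'f', 'a', 'i', 'l', 'e', 'd'] w)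
          = PySem.Chars.isIn ['d', 'e', 'c', 'o', 'd', 'e', '_', 'f', 'a', 'i', 'l', 'e', 'd'] w := by
      intro w
      by_cases hi : PySem.Chars.isIn ['d', 'e', 'c', 'o', 'd', 'e', '_', 'f', 'a', 'i', 'l', 'e', 'd'] w = true
      · simp [hi]
      · have hend : PySem.Chars.endswith w [':', 'd', 'e', 'c', 'o', 'd', 'e', '_', 'f', 'a', 'i', 'l', 'e', 'd'] = false := by
          by_contra hb
          apply hi
          have hend' : PySem.Chars.endswith w [':', 'd', 'e', 'c', 'o', 'd', 'e', '_', 'f', 'a', 'i', 'l', 'e', 'd'] = true := by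
            revert hb; cases PySem.Chars.endswith w [':', 'd', 'e', 'c', 'o', 'd', 'e', '_', 'f', 'a', 'i', 'l', 'e', 'd'] <;> simp
          rw [PySem.Chars.isIn_iff_infix]
          have hsuf : [':', 'd', 'e', 'c', 'o', 'd', 'e', '_', 'f', 'a', 'i', 'l', 'e', 'd'] <:+ w := by
            simpa [PySem.Chars.endswith, List.isSuffixOf_iff_suffix] using hend'
          have hin : ['d', 'e', 'c', 'o', 'd', 'e', '_', 'f', 'a', 'i', 'l', 'e', 'd'] <:+:
              [':', 'd', 'e', 'c', 'o', 'd', 'e', '_', 'f', 'a', 'i', 'l', 'e', 'd'] :=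
            (List.suffix_cons ':' ['d', 'e', 'c', 'o', 'd', 'e', '_', 'f', 'a', 'i', 'l', 'e', 'd']).isInfix
          exact hin.trans hsuf.isInfix
        simp [hi, hend]
    have hg : (PySem.Str.strip v == "") = false := by simpa using h
    simp [hg]
    simpa using key (PySem.Chars.strip v.toList)

-- a matched code is one of the eight table codes
theorem mem_codes_of_matchA (v c : String) (h : matchA v c = true) : c ∈ codesList := by
  unfold matchA at h
  simp only [Bool.and_eq_true, Bool.or_eq_true, beq_iff_eq] at h
  obtain ⟨-, h⟩ := h
  rcases h with ((((((⟨h, -⟩ | ⟨h, -⟩) | ⟨h, -⟩) | ⟨h, -⟩) | ⟨h, -⟩) | ⟨h, -⟩) | ⟨h, -⟩) | ⟨h, -⟩ <;>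
    subst h <;> decide

-- filtering the table then projecting the code = projecting then filtering, when the tests agree
theorem filter_map_comm {α β : Type} (l : List α) (p : α → Bool) (f : α → β) (q : β → Bool)
    (h : ∀ r ∈ l, p r = q (f r)) : (l.filter p).map f = (l.map f).filter q := by
  induction l with
  | nil => rfl
  | cons a t ih =>
    simp only [List.filter_cons, List.map_cons, h a (List.mem_cons_self)]
    cases hq : q (f a) <;>
      simp [ih (fun r hr => h r (List.mem_cons_of_mem a hr))]

-- B's output is the code table filtered by A's match predicate
theorem alt_eq_filter (values : List String) :
    warning_codes_from_strings_py_alt values = codesList.filter (predP values) := by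
  unfold warning_codes_from_strings_py_alt
  rw [PySem.List.foldl_append_if]
  simp only [List.nil_append]
  apply filter_map_comm
  intro r hr
  unfold predP
  fin_cases hr <;>
    simp [List.any_map, Function.comp_def, matchA_r1, matchA_r2, matchA_r3, matchA_r4,
      matchA_r5, matchA_r6, matchA_r7, matchA_r8]

-- ===== VERDICT (by name: the statement is the Claim_ definition above) =====
theorem warning_codes_from_strings_py_spec : Claim_equal_warning_codes_from_strings_py := by
  intro values _
  unfold Spec_warning_codes_from_strings_py warning_codes_from_strings_py
  rw [alt_eq_filter]
  have hsub : List.Sublist (codesList.filter (predP values)) codesList := List.filter_sublist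
  have hpw : codesList.Pairwise (fun a b => a < b) := by
    simp only [codesList, bRules, List.map_cons, List.map_nil, List.pairwise_cons, List.mem_cons,
      List.not_mem_nil, or_false, List.Pairwise.nil, forall_eq_or_imp, forall_eq, false_implies,
      implies_true, and_true]
    and_intros <;> (rw [String.lt_iff_toList_lt]; decide)
  have hnodup : codesList.Nodup := hpw.imp (fun hlt => ne_of_lt hlt)
  apply PySem.List.sorted_eq_of_perm_of_pairwise_lt
  · rw [List.perm_ext_iff_of_nodup (hsub.nodup hnodup)
      (nodup_foldA _ _ (by simp [PySem.Set.empty]))]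
    intro c
    rw [List.mem_filter, mem_foldA]
    simp only [PySem.Set.empty, List.not_mem_nil, false_or]
    constructor
    · rintro ⟨-, hP⟩
      simpa [predP, List.any_eq_true] using hP
    · rintro ⟨v, hv, hm⟩
      exact ⟨mem_codes_of_matchA v c hm, by
        simp only [predP, List.any_eq_true]; exact ⟨v, hv, hm⟩⟩
  · exact hpw.sublist hsub
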